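-- pv_equiv track=rewrite | github.com/thanhhau097/onboarding | e2e/generate.py | get_cuting_point_left_border
-- ===== SOURCE A (Python) =====
-- def get_cuting_point_left_border(histogram, threshold):
--     met_greater = False
--
--     for i, value in enumerate(histogram):
--         if not met_greater:
--             if value > threshold:
--                 met_greater = True
--         else:
--             if value <= threshold:
--                 point = i
--                 break
--     return point
-- ===== SOURCE B (Python) =====
-- def get_cuting_point_left_border(histogram, threshold):
--     # Build the running maximum of the strictly-earlier prefix for every position,
--     # then the cutting point is the smallest index whose value is back at/below the
--     # threshold while its prefix maximum has already exceeded the threshold.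
--     prefix_max = []
--     m = None
--     for v in histogram:
--         prefix_max.append(m)
--         m = v if m is None or v > m else m
--     return min(j for j, v in enumerate(histogram)
--                if prefix_max[j] is not None and prefix_max[j] > threshold and v <= threshold)
-- ===== Notes on version B (the rewrite author's own statement) =====
-- stated objective: alternative
-- what changed: Replaces A's single stateful flag-and-break scan by a staged computation: build a prefix-maximum array, then take the minimum over a comprehension of all indices whose prefix maximum exceeds the threshold while the value is back at or below it.
import Mathlib
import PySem

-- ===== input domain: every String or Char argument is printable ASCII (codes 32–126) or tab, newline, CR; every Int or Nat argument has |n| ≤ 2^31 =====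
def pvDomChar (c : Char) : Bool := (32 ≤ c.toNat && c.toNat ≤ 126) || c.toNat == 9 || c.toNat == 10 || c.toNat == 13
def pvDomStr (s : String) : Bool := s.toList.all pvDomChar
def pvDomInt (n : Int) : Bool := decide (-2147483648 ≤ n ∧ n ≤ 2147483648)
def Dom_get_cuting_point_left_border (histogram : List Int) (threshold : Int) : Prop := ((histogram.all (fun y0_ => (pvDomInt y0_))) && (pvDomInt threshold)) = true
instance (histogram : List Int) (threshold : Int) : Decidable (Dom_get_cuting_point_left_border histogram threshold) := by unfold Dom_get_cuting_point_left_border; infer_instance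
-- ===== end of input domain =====

-- B replaces A's stateful flag-and-break scan by a prefix-maximum array plus a minimum
-- over a comprehension of qualifying indices (objective: alternative).
-- Outside Pre_ both Pythons raise (A: UnboundLocalError, B: ValueError); the ports return 0 there.

-- ===== PORT A =====
-- A's loop: index i, flag met_greater; 'point' is only bound when the break fires, so the
-- helper returns Option Int (none = the loop ends with 'point' unbound → Python raises).
def pvAuxA (threshold : Int) : List Int → Nat → Bool → Option Int
  | [], _, _ => none
  | v :: rest, i, met =>
    if !met then
      if v > threshold then pvAuxA threshold rest (i + 1) true
      else pvAuxA threshold rest (i + 1) false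
    else
      if v ≤ threshold then some (i : Int)
      else pvAuxA threshold rest (i + 1) true

def get_cuting_point_left_border (histogram : List Int) (threshold : Int) : Int :=
  (pvAuxA threshold histogram 0 false).getD 0   -- none only outside Pre_ (Python raises there)

-- ===== PORT B =====
-- 'm = v if m is None or v > m else m'
def pvCombine (m : Option Int) (v : Int) : Int :=
  match m with
  | none => v
  | some m0 => if v > m0 then v else m0

-- the prefix_max list built by B's first loop, given the running value m
def pvPrefixMax : List Int → Option Int → List (Option Int)
  | [], _ => []
  | v :: rest, m => m :: pvPrefixMax rest (some (pvCombine m v))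

-- 'prefix_max[j] is not None and prefix_max[j] > threshold and v <= threshold'
def pvCond (pm : List (Option Int)) (h : List Int) (t : Int) (j : Nat) : Bool :=
  match pm.getD j none with
  | none => false
  | some p => decide (p > t) && decide (h.getD j 0 ≤ t)

def get_cuting_point_left_border_alt (histogram : List Int) (threshold : Int) : Int :=
  match ((List.range histogram.length).filter
      (fun j => pvCond (pvPrefixMax histogram none) histogram threshold j)).min? with
  | none => 0        -- Python B raises ValueError here; outside Pre_
  | some j => (j : Int)

-- ===== PRECONDITION & SPEC =====
-- Pre_ excludes exactly the inputs where A's 'point' is never bound (no value above the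
-- threshold, or no later value back at/below it): Python A raises UnboundLocalError there
-- (and Python B raises ValueError there).
def Pre_get_cuting_point_left_border (histogram : List Int) (threshold : Int) : Prop :=
  ∃ i < histogram.length, ∃ j < histogram.length,
    i < j ∧ threshold < histogram.getD i 0 ∧ histogram.getD j 0 ≤ threshold
instance (histogram : List Int) (threshold : Int) : Decidable (Pre_get_cuting_point_left_border histogram threshold) := by
  unfold Pre_get_cuting_point_left_border; infer_instance

def pvWitness_get_cuting_point_left_border : List Int × Int := ([1, 5, 2], 3)

def Spec_get_cuting_point_left_border (histogram : List Int) (threshold : Int) (out : Int) : Prop := out = get_cuting_point_left_border_alt histogram threshold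
instance (histogram : List Int) (threshold : Int) (out : Int) : Decidable (Spec_get_cuting_point_left_border histogram threshold out) := by unfold Spec_get_cuting_point_left_border; infer_instance

-- ===== CLAIM (what is proved, stated in full; the proofs are below) =====
def Claim_equal_get_cuting_point_left_border : Prop := ∀ (histogram : List Int) (threshold : Int), Dom_get_cuting_point_left_border histogram threshold → Pre_get_cuting_point_left_border histogram threshold → Spec_get_cuting_point_left_border histogram threshold (get_cuting_point_left_border histogram threshold)

-- ===== LEMMAS AND PROOFS =====

-- A-side: once the flag is set, A's loop is a first-match search for value ≤ threshold.
theorem pvAuxA_true (threshold : Int) (l : List Int) (i : Nat) :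
    pvAuxA threshold l i true
      = (l.findIdx? (fun v => decide (v ≤ threshold))).map (fun k => ((i + k : Nat) : Int)) := by
  induction l generalizing i with
  | nil => simp [pvAuxA]
  | cons v rest ih =>
    rw [show pvAuxA threshold (v :: rest) i true
          = if v ≤ threshold then some ((i : Nat) : Int) else pvAuxA threshold rest (i + 1) true
        from rfl,
      List.findIdx?_cons]
    by_cases h : v ≤ threshold
    · simp [h]
    · rw [if_neg h, ih (i + 1)]
      simp only [h, decide_false, Bool.false_eq_true, if_false, Option.map_map]
      cases rest.findIdx? (fun v => decide (v ≤ threshold)) <;> simp <;> omega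

-- A-side: before the flag is set, A's loop is a first-match search for value > threshold
-- followed by the ≤-search on the remainder.
theorem pvAuxA_false (threshold : Int) (l : List Int) (i : Nat) :
    pvAuxA threshold l i false
      = (l.findIdx? (fun v => decide (v > threshold))).bind
          (fun r => ((l.drop (r + 1)).findIdx? (fun v => decide (v ≤ threshold))).map
            (fun k => ((i + r + 1 + k : Nat) : Int))) := by
  induction l generalizing i with
  | nil => simp [pvAuxA]
  | cons v rest ih =>
    rw [show pvAuxA threshold (v :: rest) i false
          = if v > threshold then pvAuxA threshold rest (i + 1) true
            else pvAuxA threshold rest (i + 1) false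
        from rfl,
      List.findIdx?_cons]
    by_cases h : v > threshold
    · rw [if_pos h, pvAuxA_true]
      simp only [h, decide_true, if_true, Option.bind_some, List.drop_succ_cons,
        List.drop_zero]
    · rw [if_neg h, ih (i + 1)]
      simp only [h, decide_false, Bool.false_eq_true, if_false]
      cases hr : rest.findIdx? (fun v => decide (v > threshold)) with
      | none => simp
      | some r =>
        simp only [Option.map_some, Option.bind_some, List.drop_succ_cons]
        cases (rest.drop (r + 1)).findIdx? (fun v => decide (v ≤ threshold)) <;> simp <;> omega

-- 'prefix_max[j] is not None and prefix_max[j] > t', as a Bool on the Option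
def pvOptGT (o : Option Int) (t : Int) : Bool :=
  match o with
  | none => false
  | some x => decide (x > t)

theorem pvOptGT_combine (m : Option Int) (v t : Int) :
    pvOptGT (some (pvCombine m v)) t = (decide (v > t) || pvOptGT m t) := by
  cases m with
  | none => simp [pvCombine, pvOptGT]
  | some m0 =>
    simp only [pvCombine, pvOptGT]
    by_cases h : v > m0 <;> simp [h] <;> omega

-- the prefix maximum exceeds t iff some strictly earlier element does (in-range j)
theorem pvPrefixMax_gt (t : Int) (l : List Int) (m : Option Int) (j : Nat) (hj : j < l.length) :
    pvOptGT ((pvPrefixMax l m).getD j none) t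
      = (pvOptGT m t || (l.take j).any (fun v => decide (v > t))) := by
  induction l generalizing m j with
  | nil => simp at hj
  | cons v rest ih =>
    cases j with
    | zero => simp [pvPrefixMax]
    | succ j =>
      simp only [pvPrefixMax, List.getD_cons_succ, List.take_succ_cons, List.any_cons]
      rw [ih _ j (by simpa using hj), pvOptGT_combine]
      cases pvOptGT m t <;> cases hv : decide (v > t) <;> simp

-- findIdx? as the head of the filtered index range
theorem pv_findIdx?_eq_head (q : Int → Bool) (l : List Int) :
    l.findIdx? q = ((List.range l.length).filter (fun j => q (l.getD j 0))).head? := by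
  induction l with
  | nil => simp
  | cons v rest ih =>
    rw [List.findIdx?_cons, List.length_cons, List.range_succ_eq_map, List.filter_cons]
    simp only [List.getD_cons_zero]
    by_cases h : q v
    · simp [h]
    · simp only [h, Bool.false_eq_true, if_false, List.filter_map, List.head?_map, ih]
      have h2 : ((fun j => q ((v :: rest).getD j 0)) ∘ Nat.succ)
          = (fun j => q (rest.getD j 0)) := by
        funext j
        simp
      rw [h2]

-- the accumulator of Nat min? stays ≥ a if everything is
theorem pv_minfold_ge (a x : Nat) (l : List Nat) (hax : a ≤ x) (h : ∀ y ∈ l, a ≤ y) :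
    a ≤ l.min?.elim x (min x) := by
  induction l generalizing x with
  | nil => exact hax
  | cons b r ih =>
    rw [List.min?_cons, Option.elim_some]
    exact le_min hax (ih b (h b (by simp)) (fun y hy => h y (by simp [hy])))

-- a strictly increasing list's minimum is its head
theorem pv_min?_eq_head? (l : List Nat) (hl : l.Pairwise (· < ·)) : l.min? = l.head? := by
  cases l with
  | nil => rfl
  | cons a rest =>
    rw [List.min?_cons, List.head?_cons]
    have ha : ∀ x ∈ rest, a ≤ x := by
      intro x hx
      exact le_of_lt ((List.pairwise_cons.mp hl).1 x hx)
    congr 1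
    cases rest with
    | nil => rfl
    | cons b r =>
      rw [List.min?_cons, Option.elim_some]
      exact min_eq_left
        (pv_minfold_ge a b r (ha b (by simp)) (fun y hy => ha y (by simp [hy])))

-- the two ports agree everywhere (both return 0 where both Pythons raise)
theorem pv_ports_eq (histogram : List Int) (threshold : Int) :
    get_cuting_point_left_border histogram threshold
      = get_cuting_point_left_border_alt histogram threshold := by
  unfold get_cuting_point_left_border get_cuting_point_left_border_alt
  rw [pvAuxA_false]
  have hcond : ∀ j, j < histogram.length →
      pvCond (pvPrefixMax histogram none) histogram threshold j
        = ((histogram.take j).any (fun v => decide (v > threshold))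
            && decide (histogram.getD j 0 ≤ threshold)) := by
    intro j hj
    have h1 : pvCond (pvPrefixMax histogram none) histogram threshold j
        = (pvOptGT ((pvPrefixMax histogram none).getD j none) threshold
            && decide (histogram.getD j 0 ≤ threshold)) := by
      unfold pvCond pvOptGT
      cases (pvPrefixMax histogram none).getD j none <;> simp
    rw [h1, pvPrefixMax_gt _ _ _ _ hj]
    simp [pvOptGT]
  have hmin : ∀ (p : Nat → Bool),
      ((List.range histogram.length).filter p).min?
        = ((List.range histogram.length).filter p).head? := by
    intro p
    exact pv_min?_eq_head? _ ((List.pairwise_lt_range).filter p)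
  cases hr : histogram.findIdx? (fun v => decide (v > threshold)) with
  | none =>
    have hnone : ∀ x ∈ histogram, ¬ (x > threshold) := by
      intro x hx
      simpa using List.findIdx?_eq_none_iff.mp hr x hx
    have hfe : (List.range histogram.length).filter
        (fun j => pvCond (pvPrefixMax histogram none) histogram threshold j) = [] := by
      rw [List.filter_eq_nil_iff]
      intro j hj
      rw [hcond j (List.mem_range.mp hj)]
      have : (histogram.take j).any (fun v => decide (v > threshold)) = false := by
        rw [List.any_eq_false]
        intro x hx
        simpa using hnone x (List.mem_of_mem_take hx)
      simp [this]
    rw [hfe]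
    simp
  | some r =>
    obtain ⟨hrlen, hrval, hrmin⟩ := List.findIdx?_eq_some_iff_getElem.mp hr
    have hany : ∀ j, j ≤ histogram.length →
        (histogram.take j).any (fun v => decide (v > threshold)) = decide (r < j) := by
      intro j hj
      by_cases h : r < j
      · simp only [h, decide_true]
        rw [List.any_eq_true]
        refine ⟨histogram[r], ?_, by simpa using hrval⟩
        exact List.mem_take_iff_getElem.mpr ⟨r, by omega, rfl⟩
      · simp only [h, decide_false]
        rw [List.any_eq_false]
        intro x hx
        obtain ⟨i, hi, hxi⟩ := List.mem_take_iff_getElem.mp hx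
        have := hrmin i (by omega)
        simp_all
    have hfilter :
        (List.range histogram.length).filter
            (fun j => pvCond (pvPrefixMax histogram none) histogram threshold j)
          = (List.range histogram.length).filter
              (fun j => decide (r < j) && decide (histogram.getD j 0 ≤ threshold)) := by
      apply List.filter_congr
      intro j hj
      have hjlt : j < histogram.length := List.mem_range.mp hj
      rw [hcond j hjlt, hany j (le_of_lt hjlt)]
    obtain ⟨m, hm⟩ : ∃ m, histogram.length = (r + 1) + m :=
      ⟨histogram.length - (r + 1), by omega⟩
    have hdl : (histogram.drop (r + 1)).length = m := by
      rw [List.length_drop]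
      omega
    have hrange :
        (List.range histogram.length).filter
            (fun j => decide (r < j) && decide (histogram.getD j 0 ≤ threshold))
          = ((List.range m).filter
              (fun k => decide ((histogram.drop (r + 1)).getD k 0 ≤ threshold))).map
              (fun k => r + 1 + k) := by
      rw [hm, List.range_add, List.filter_append]
      have h1 : (List.range (r + 1)).filter
          (fun j => decide (r < j) && decide (histogram.getD j 0 ≤ threshold)) = [] := by
        rw [List.filter_eq_nil_iff]
        intro j hj
        have : j < r + 1 := List.mem_range.mp hj
        simp [show ¬ r < j by omega]
      rw [h1, List.nil_append, List.filter_map]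
      congr 1
      apply List.filter_congr
      intro k hk
      simp [Function.comp, show r < r + 1 + k by omega]
    simp only [Option.bind_some]
    have hfi : ((List.range (histogram.drop (r + 1)).length).filter
          (fun k => decide ((histogram.drop (r + 1)).getD k 0 ≤ threshold))).head?
        = (histogram.drop (r + 1)).findIdx? (fun v => decide (v ≤ threshold)) :=
      by exact (pv_findIdx?_eq_head (fun v => decide (v ≤ threshold)) (histogram.drop (r + 1))).symm
    rw [hfilter, hmin, hrange, List.head?_map, ← hdl, hfi]
    cases hk : (histogram.drop (r + 1)).findIdx? (fun v => decide (v ≤ threshold)) with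
    | none => simp
    | some k =>
      simp only [Option.map_some, Option.getD_some]
      push_cast
      omega

-- ===== VERDICT (by name: the statement is the Claim_ definition above) =====
theorem get_cuting_point_left_border_spec : Claim_equal_get_cuting_point_left_border := by
  intro histogram threshold _ _
  unfold Spec_get_cuting_point_left_border
  exact pv_ports_eq histogram threshold
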